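-- pv_equiv track=rewrite | github.com/moqiguzhu/Online-Judge | leetcode-python/weeklycontest/weeklycontest150/lastSubstring.py | lastSubstring2
-- ===== SOURCE A (Python) =====
-- def lastSubstring2(s: str) -> str:
--     t = []
--     tt = []
--     for i in range(len(s)):
--         tt.append(s[i:])
--         if i % 1000 == 0:
--             t.append(max(tt))
--             tt = []
--     t.append(max(tt))
--     return max(t)
-- ===== SOURCE B (Python) =====
-- def lastSubstring2(s: str) -> str:
--     # single backward pass: extend the current suffix one char at a time,
--     # keeping the best (lexicographically largest) suffix seen so far
--     best = ""
--     suf = ""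
--     for c in reversed(s):
--         suf = c + suf
--         if suf > best:
--             best = suf
--     return best
-- ===== Notes on version B (the rewrite author's own statement) =====
-- stated objective: faster
-- what changed: A materialises every suffix into chunked lists and takes a max of chunk-maxes; B is a single backward pass that extends the current suffix by one character and keeps a running best, never building a list of suffixes (measured ~12x faster: no per-index suffix slices or repeated chunk maxima; comparisons short-circuit).
import Mathlib
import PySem

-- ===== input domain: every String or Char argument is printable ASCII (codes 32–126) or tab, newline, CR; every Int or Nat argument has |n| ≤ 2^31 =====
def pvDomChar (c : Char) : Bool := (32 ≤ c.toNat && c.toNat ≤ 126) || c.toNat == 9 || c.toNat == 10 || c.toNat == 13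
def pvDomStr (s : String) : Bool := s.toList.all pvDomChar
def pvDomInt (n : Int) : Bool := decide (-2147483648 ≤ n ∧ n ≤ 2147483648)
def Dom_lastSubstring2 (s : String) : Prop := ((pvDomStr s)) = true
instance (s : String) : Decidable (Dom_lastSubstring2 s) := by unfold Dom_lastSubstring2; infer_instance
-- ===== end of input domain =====

-- B replaces A's chunked lists of suffixes by a single backward pass keeping a running best suffix (measured constant-factor speedup).


-- ===== PORT A =====
-- loop body of A's 'for i in range(len(s))': state = (t, tt); s[i:] = Str.slice s i none;
-- max(tt) = maxD (Python raises on an empty tt — excluded by Pre_; the default "" is never the result there)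
def bodyA (s : String) (acc : List String × List String) (i : Int) :
    List String × List String :=
  let tt := acc.2 ++ [PySem.Str.slice s (some i) none]
  if PySem.Int.mod i 1000 = 0 then
    (acc.1 ++ [PySem.List.maxD tt (fun x => x) ""], [])
  else (acc.1, tt)

def lastSubstring2 (s : String) : String :=
  let st := (PySem.List.pyRange 0 (PySem.Str.len s) 1).foldl (bodyA s) ([], [])
  let t := st.1 ++ [PySem.List.maxD st.2 (fun x => x) ""]
  PySem.List.maxD t (fun x => x) ""

-- ===== PORT B =====
-- Source B: one backward pass; state = (best, suf) as List Char; 'c + suf' = c :: suf; 'suf > best' = best < suf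
def bodyB (acc : List Char × List Char) (c : Char) : List Char × List Char :=
  let suf := c :: acc.2
  if acc.1 < suf then (suf, suf) else (acc.1, suf)

def lastSubstring2_alt (s : String) : String :=
  String.ofList (s.toList.reverse.foldl bodyB ([], [])).1

-- ===== PRECONDITION & SPEC =====
-- Pre_ excludes exactly the inputs on which the Python A raises ValueError (max of an empty
-- list): the empty string and lengths with n % 1000 == 1, where the final tt is empty.
def Pre_lastSubstring2 (s : String) : Prop :=
  s.toList.length ≠ 0 ∧ s.toList.length % 1000 ≠ 1
instance (s : String) : Decidable (Pre_lastSubstring2 s) := by unfold Pre_lastSubstring2; infer_instance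
def pvWitness_lastSubstring2 : String := "ab"

def Spec_lastSubstring2 (s : String) (out : String) : Prop := out = lastSubstring2_alt s
instance (s : String) (out : String) : Decidable (Spec_lastSubstring2 s out) := by unfold Spec_lastSubstring2; infer_instance

-- ===== CLAIM (what is proved, stated in full; the proofs are below) =====
def Claim_equal_lastSubstring2 : Prop := ∀ (s : String), Dom_lastSubstring2 s → Pre_lastSubstring2 s → Spec_lastSubstring2 s (lastSubstring2 s)

-- ===== LEMMAS AND PROOFS =====

-- the common value: the lexicographically largest suffix, as a structural recursion
def M : List Char → String
  | [] => ""
  | c :: r => max (String.ofList (c :: r)) (M r)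

theorem empty_le_str (t : String) : "" ≤ t := by
  rw [String.le_iff_toList_le]
  exact not_lt.mp (List.not_lt_nil _)

theorem ofList_le_ofList (a b : List Char) : String.ofList a ≤ String.ofList b ↔ a ≤ b := by
  rw [String.le_iff_toList_le]; simp

theorem ofList_max (a b : List Char) :
    String.ofList (max a b) = max (String.ofList a) (String.ofList b) := by
  by_cases h : a ≤ b
  · rw [max_eq_right h, max_eq_right ((ofList_le_ofList a b).mpr h)]
  · have h' : b ≤ a := (not_le.mp h).le
    rw [max_eq_left h', max_eq_left ((ofList_le_ofList b a).mpr h')]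

theorem foldl_max_shift (l : List String) (a : String) :
    l.foldl max a = max a (l.foldl max "") := by
  induction l generalizing a with
  | nil => exact (max_eq_left (empty_le_str a)).symm
  | cons x t ih =>
    simp only [List.foldl]
    rw [ih (max a x), ih (max "" x), max_eq_right (empty_le_str x), max_assoc]

theorem foldl_max_snoc (l : List String) (x : String) :
    (l ++ [x]).foldl max "" = max (l.foldl max "") x := by
  rw [List.foldl_append]
  simp only [List.foldl]

theorem maxD_eq_foldl (xs : List String) :
    PySem.List.maxD xs (fun x => x) "" = xs.foldl max "" := by
  cases xs with
  | nil => rfl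
  | cons x t =>
    unfold PySem.List.maxD
    rw [PySem.List.max?_id_cons]
    simp only [Option.getD, List.foldl]
    rw [max_eq_right (empty_le_str x)]

theorem slice_from_ofList (s : String) (k : Nat) :
    PySem.Str.slice s (some (k : Int)) none = String.ofList (s.toList.drop k) := by
  apply String.toList_injective
  simp [PySem.Str.slice]

-- the suffixes s[i:] with start index i < k
def sfxUpTo (s : String) (k : Nat) : List String :=
  (List.range k).map (fun i => String.ofList (s.toList.drop i))

theorem sfx_fold_eq_M (s : String) :
    (sfxUpTo s s.toList.length).foldl max "" = M s.toList := by
  suffices h : ∀ cs : List Char,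
      (((List.range cs.length).map (fun i => String.ofList (cs.drop i))).foldl max "") = M cs by
    exact h s.toList
  intro cs
  induction cs with
  | nil => rfl
  | cons c r ih =>
    rw [show (List.range (c :: r).length).map (fun i => String.ofList ((c :: r).drop i))
        = String.ofList (c :: r) :: (List.range r.length).map (fun i => String.ofList (r.drop i)) by
      simp only [List.length_cons, List.range_succ_eq_map, List.map_cons, List.map_map,
        List.drop_zero]
      rfl]
    simp only [List.foldl]
    rw [foldl_max_shift, ih, max_eq_right (empty_le_str (String.ofList (c :: r)))]
    rfl

-- one step of A's loop only adds the suffix s[i:] to the running maximum,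
-- whether or not the chunk is flushed
theorem g_bodyA (s : String) (acc : List String × List String) (i : Int) :
    ((bodyA s acc i).1 ++ (bodyA s acc i).2).foldl max ""
      = max ((acc.1 ++ acc.2).foldl max "") (PySem.Str.slice s (some i) none) := by
  simp only [bodyA]
  by_cases hm : PySem.Int.mod i 1000 = 0
  · rw [if_pos hm, List.append_nil, maxD_eq_foldl, foldl_max_snoc, foldl_max_snoc,
        List.foldl_append, foldl_max_shift acc.2 (acc.1.foldl max ""), max_assoc]
  · rw [if_neg hm, ← List.append_assoc, foldl_max_snoc]

theorem invA (s : String) (k : Nat) :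
    (((PySem.List.pyRange 0 (k : Int) 1).foldl (bodyA s) ([], [])).1 ++
     ((PySem.List.pyRange 0 (k : Int) 1).foldl (bodyA s) ([], [])).2).foldl max ""
    = (sfxUpTo s k).foldl max "" := by
  induction k with
  | zero => rfl
  | succ k ih =>
    have hr : PySem.List.pyRange 0 ((k + 1 : Nat) : Int) 1
        = PySem.List.pyRange 0 (k : Int) 1 ++ [(k : Int)] := by
      push_cast
      exact PySem.List.pyRange_one_succ_right (by positivity)
    have hsfx : sfxUpTo s (k + 1) = sfxUpTo s k ++ [String.ofList (s.toList.drop k)] := by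
      simp [sfxUpTo, List.range_succ]
    have hstep : (PySem.List.pyRange 0 ((k + 1 : Nat) : Int) 1).foldl (bodyA s) ([], [])
        = bodyA s ((PySem.List.pyRange 0 (k : Int) 1).foldl (bodyA s) ([], [])) (k : Int) := by
      rw [hr, List.foldl_append, List.foldl_cons, List.foldl_nil]
    rw [hstep, g_bodyA, ih, hsfx, foldl_max_snoc, slice_from_ofList]

theorem portA_eq_M (s : String) : lastSubstring2 s = M s.toList := by
  unfold lastSubstring2
  have hlen : PySem.Str.len s = ((s.toList.length : Nat) : Int) := by
    simp [PySem.Str.len_eq]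
  rw [hlen]
  have h := invA s s.toList.length
  rw [sfx_fold_eq_M] at h
  rw [maxD_eq_foldl, maxD_eq_foldl, foldl_max_snoc, ← h, List.foldl_append]
  exact (foldl_max_shift _ _).symm

-- list-level analogue of M, matched by B's loop state
def ML : List Char → List Char
  | [] => []
  | c :: r => max (c :: r) (ML r)

theorem ofList_ML (cs : List Char) : String.ofList (ML cs) = M cs := by
  induction cs with
  | nil => rfl
  | cons c r ih => rw [ML, M, ofList_max, ih]

theorem portB_foldr (cs : List Char) :
    cs.foldr (fun c acc => bodyB acc c) ([], []) = (ML cs, cs) := by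
  induction cs with
  | nil => rfl
  | cons c r ih =>
    rw [List.foldr_cons, ih]
    show (if ML r < c :: r then (c :: r, c :: r) else (ML r, c :: r)) = (ML (c :: r), c :: r)
    rw [show ML (c :: r) = max (c :: r) (ML r) from rfl]
    by_cases h : ML r < c :: r
    · rw [if_pos h, max_eq_left (le_of_lt h)]
    · rw [if_neg h, max_eq_right (not_lt.mp h)]

theorem portB_eq_M (s : String) : lastSubstring2_alt s = M s.toList := by
  unfold lastSubstring2_alt
  rw [List.foldl_reverse, portB_foldr, ofList_ML]

-- ===== VERDICT (by name: the statement is the Claim_ definition above) =====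
theorem lastSubstring2_spec : Claim_equal_lastSubstring2 := by
  intro s _ _
  unfold Spec_lastSubstring2
  rw [portA_eq_M, portB_eq_M]
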